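-- pv_equiv track=rewrite | github.com/ThisaraAriyawansha/TrashSense | app.py | categorize_prediction
-- ===== SOURCE A (Python) =====
-- def categorize_prediction(prediction):
--     # Define your categories here
--     category_mapping = {
--         'Category 1': ['plastic_bag', 'water_bottle'],
--         'Category 2': ['paper', 'cardboard'],
--         'Category 3': ['metal_can', 'aluminum_foil'],
--         'Category 4': ['organic', 'food_waste']
--     }
--
--     for category, class_names in category_mapping.items():
--         if prediction in class_names:
--             return category
--     return 'Uncategorized'
-- ===== SOURCE B (Python) =====
-- def categorize_prediction(prediction):
--     class_names = ['plastic_bag', 'water_bottle', 'paper', 'cardboard',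
--                    'metal_can', 'aluminum_foil', 'organic', 'food_waste']
--     try:
--         i = class_names.index(prediction)
--     except ValueError:
--         return 'Uncategorized'
--     return 'Category ' + str(i // 2 + 1)
-- ===== Notes on version B (the rewrite author's own statement) =====
-- stated objective: alternative
-- what changed: Drops the category->names table entirely: B keeps one flat ordered list of class names and computes the category label arithmetically from the position (index // 2 + 1), instead of scanning categories and testing membership in each list.
import Mathlib
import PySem

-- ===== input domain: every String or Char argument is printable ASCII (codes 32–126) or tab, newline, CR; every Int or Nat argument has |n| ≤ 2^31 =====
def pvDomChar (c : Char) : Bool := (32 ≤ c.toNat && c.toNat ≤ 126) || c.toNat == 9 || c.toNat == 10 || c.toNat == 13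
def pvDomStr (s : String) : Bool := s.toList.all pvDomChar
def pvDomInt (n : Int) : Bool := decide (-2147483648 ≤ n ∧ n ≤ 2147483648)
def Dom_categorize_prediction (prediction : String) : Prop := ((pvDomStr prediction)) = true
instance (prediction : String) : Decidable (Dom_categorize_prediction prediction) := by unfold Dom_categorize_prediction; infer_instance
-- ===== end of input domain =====

-- B drops the category table: a flat ordered list of class names and the arithmetic label 'Category (index // 2 + 1)' replace A's scan over categories with a membership test in each list.


-- ===== PORT A =====
def pvCategoryMapping : List (String × List String) :=
  [("Category 1", ["plastic_bag", "water_bottle"]),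
   ("Category 2", ["paper", "cardboard"]),
   ("Category 3", ["metal_can", "aluminum_foil"]),
   ("Category 4", ["organic", "food_waste"])]

-- loop over category_mapping.items(); first matching category wins
def pvScan (prediction : String) : List (String × List String) → String
  | [] => "Uncategorized"
  | (category, class_names) :: rest =>
      if prediction ∈ class_names then category else pvScan prediction rest

def categorize_prediction (prediction : String) : String :=
  pvScan prediction pvCategoryMapping

-- ===== PORT B =====
-- B: flat ordered list; the category label is computed from the index
def pvClassNames : List String :=
  ["plastic_bag", "water_bottle", "paper", "cardboard",
   "metal_can", "aluminum_foil", "organic", "food_waste"]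

def categorize_prediction_alt (prediction : String) : String :=
  match PySem.List.index? pvClassNames prediction with
  | none => "Uncategorized"
  | some i => "Category " ++ PySem.Int.toStr (PySem.Int.floordiv (i : Int) 2 + 1)

-- ===== PRECONDITION & SPEC =====
def Spec_categorize_prediction (prediction : String) (out : String) : Prop := out = categorize_prediction_alt prediction
instance (prediction : String) (out : String) : Decidable (Spec_categorize_prediction prediction out) := by unfold Spec_categorize_prediction; infer_instance

-- ===== CLAIM =====
def Claim_equal_categorize_prediction : Prop := ∀ (prediction : String), Dom_categorize_prediction prediction → Spec_categorize_prediction prediction (categorize_prediction prediction)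

-- ===== LEMMAS AND PROOFS =====

-- ===== VERDICT =====
theorem categorize_prediction_spec : Claim_equal_categorize_prediction := by
  intro p _
  unfold Spec_categorize_prediction
  by_cases h1 : "plastic_bag" = p
  · subst h1; decide
  by_cases h2 : "water_bottle" = p
  · subst h2; decide
  by_cases h3 : "paper" = p
  · subst h3; decide
  by_cases h4 : "cardboard" = p
  · subst h4; decide
  by_cases h5 : "metal_can" = p
  · subst h5; decide
  by_cases h6 : "aluminum_foil" = p
  · subst h6; decide
  by_cases h7 : "organic" = p
  · subst h7; decide
  by_cases h8 : "food_waste" = p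
  · subst h8; decide
  have g1 : p ≠ "plastic_bag" := fun h => h1 h.symm
  have g2 : p ≠ "water_bottle" := fun h => h2 h.symm
  have g3 : p ≠ "paper" := fun h => h3 h.symm
  have g4 : p ≠ "cardboard" := fun h => h4 h.symm
  have g5 : p ≠ "metal_can" := fun h => h5 h.symm
  have g6 : p ≠ "aluminum_foil" := fun h => h6 h.symm
  have g7 : p ≠ "organic" := fun h => h7 h.symm
  have g8 : p ≠ "food_waste" := fun h => h8 h.symm
  have hnone : PySem.List.index? pvClassNames p = none := by
    rw [PySem.List.index?_eq_none_iff]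
    simp [pvClassNames, g1, g2, g3, g4, g5, g6, g7, g8]
  simp only [PySem.List.index?_eq_idxOf?] at hnone
  simp [categorize_prediction, categorize_prediction_alt, pvScan, pvCategoryMapping,
    hnone, g1, g2, g3, g4, g5, g6, g7, g8]
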